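-- pv_equiv track=rewrite | github.com/NovaCiduki/ProjectEulerChallange | p21-30/p23/solution.py | perfect_abundant_or_deficient
-- ===== SOURCE A (Python) =====
-- def perfect_abundant_or_deficient(n):
--     divisors_sum = 0
--     for devs in range(1, n):
--         if n % devs == 0:
--             divisors_sum += devs
--     if divisors_sum == n:
--         return 0  # "perfect"
--     elif divisors_sum > n:
--         return 1  # "abundant"
--     else:
--         return 2  # "deficient"
-- ===== SOURCE B (Python) =====
-- def perfect_abundant_or_deficient(n):
--     s = 0
--     i = 1
--     while i * i <= n:
--         if n % i == 0:
--             j = n // i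
--             if i != n:
--                 s += i
--             if j != i and j != n:
--                 s += j
--         i += 1
--     if s == n:
--         return 0  # "perfect"
--     elif s > n:
--         return 1  # "abundant"
--     else:
--         return 2  # "deficient"
-- ===== Notes on version B (the rewrite author's own statement) =====
-- stated objective: faster
-- what changed: Replaces the O(n) scan of all candidates 1..n-1 with a divisor-pair loop up to sqrt(n) that adds each small divisor together with its cofactor.
import Mathlib
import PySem

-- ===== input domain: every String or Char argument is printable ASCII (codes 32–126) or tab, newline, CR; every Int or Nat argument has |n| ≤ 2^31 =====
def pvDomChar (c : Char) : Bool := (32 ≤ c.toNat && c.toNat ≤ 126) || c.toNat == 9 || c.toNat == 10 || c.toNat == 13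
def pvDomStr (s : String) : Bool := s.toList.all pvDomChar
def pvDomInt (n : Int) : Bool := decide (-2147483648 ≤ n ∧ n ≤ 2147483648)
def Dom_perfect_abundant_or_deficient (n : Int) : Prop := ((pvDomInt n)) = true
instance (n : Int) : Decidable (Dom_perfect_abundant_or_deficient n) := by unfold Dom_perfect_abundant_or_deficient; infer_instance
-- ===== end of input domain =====

-- B replaces A's O(n) scan of 1..n-1 with a divisor-pair loop up to √n (asymptotically faster).

-- ===== PORT A =====
def perfect_abundant_or_deficient (n : Int) : Int :=
  let divisors_sum :=
    (PySem.List.pyRange 1 n 1).foldl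
      (fun s devs => if PySem.Int.mod n devs == 0 then s + devs else s) 0
  if divisors_sum == n then 0
  else if divisors_sum > n then 1
  else 2

-- ===== PORT B =====
-- the 'while i * i <= n' loop of Source B; terminates because i increases and i ≤ n while it runs
def pvAltLoop (n i s : Int) : Int :=
  if h : i * i ≤ n then
    pvAltLoop n (i + 1)
      (if PySem.Int.mod n i == 0 then
        let j := PySem.Int.floordiv n i
        let s1 := if i ≠ n then s + i else s
        if j ≠ i ∧ j ≠ n then s1 + j else s1
      else s)
  else s
termination_by (n + 1 - i).toNat
decreasing_by
  have hin : i ≤ n := by nlinarith [mul_self_nonneg i]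
  omega

def perfect_abundant_or_deficient_alt (n : Int) : Int :=
  let s := pvAltLoop n 1 0
  if s == n then 0
  else if s > n then 1
  else 2

-- ===== PRECONDITION & SPEC =====
def Spec_perfect_abundant_or_deficient (n : Int) (out : Int) : Prop := out = perfect_abundant_or_deficient_alt n
instance (n : Int) (out : Int) : Decidable (Spec_perfect_abundant_or_deficient n out) := by unfold Spec_perfect_abundant_or_deficient; infer_instance

-- ===== CLAIM (what is proved, stated in full; the proofs are below) =====
def Claim_equal_perfect_abundant_or_deficient : Prop := ∀ (n : Int), Dom_perfect_abundant_or_deficient n → Spec_perfect_abundant_or_deficient n (perfect_abundant_or_deficient n)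

-- ===== LEMMAS AND PROOFS =====

-- contribution of one small divisor d of n in B's pair loop
def pvContrib (n d : Int) : Int :=
  (if d ≠ n then d else 0) + (if n / d ≠ d ∧ n / d ≠ n then n / d else 0)

lemma pvIcoSucc (a b : Int) (h : a ≤ b) :
    Finset.Ico a (b + 1) = insert b (Finset.Ico a b) := by
  ext d; simp [Finset.mem_Ico]; omega

lemma pvIccCons (a b : Int) (h : a ≤ b) :
    Finset.Icc a b = insert a (Finset.Icc (a + 1) b) := by
  ext d; simp [Finset.mem_Icc]; omega

-- A's fold is the sum of (if d ∣ n then d else 0) over Ico 1 n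
lemma pvAFold (n b : Int) (hb : 1 ≤ b) :
    (PySem.List.pyRange 1 b 1).foldl
      (fun s devs => if PySem.Int.mod n devs == 0 then s + devs else s) 0
    = ∑ d ∈ Finset.Ico 1 b, (if d ∣ n then d else 0) := by
  induction hbn : (b - 1).toNat generalizing b with
  | zero =>
    have : b = 1 := by omega
    subst this
    simp [PySem.List.pyRange_one_eq_nil (by omega : (1:Int) ≤ 1)]
  | succ k ih =>
    have hb1 : 1 ≤ b - 1 := by omega
    rw [show b = (b - 1) + 1 by ring,
        PySem.List.pyRange_one_succ_right (by omega : (1:Int) ≤ b - 1),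
        List.foldl_append, pvIcoSucc 1 (b - 1) hb1,
        Finset.sum_insert (by simp [Finset.mem_Ico]),
        ih (b - 1) hb1 (by omega)]
    simp only [List.foldl_cons, List.foldl_nil]
    have hmod : PySem.Int.mod n (b - 1) = n % (b - 1) :=
      PySem.Int.mod_eq_emod_of_pos (by omega)
    by_cases hd : (b - 1) ∣ n
    · simp [hmod, hd, Int.emod_eq_zero_of_dvd hd]
      try ring
    · simp [hmod, hd]
      try ring

-- divisor facts, all for 1 ≤ n
lemma pvDivFacts (n d : Int) (hn : 1 ≤ n) (hd1 : 1 ≤ d) (hdvd : d ∣ n) :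
    1 ≤ n / d ∧ (n / d) * d = n ∧ d ∣ n ∧ (n / d) ∣ n ∧ n / (n / d) = d ∧ n / d ≤ n := by
  have hd0 : d ≠ 0 := by omega
  have hmul : n / d * d = n := Int.ediv_mul_cancel hdvd
  have he1 : 1 ≤ n / d := by nlinarith
  have hedvd : (n / d) ∣ n := Dvd.intro d (by linarith [hmul])
  have hback : n / (n / d) = d := by
    have heq : n = d * (n / d) := by linarith [hmul]
    calc n / (n / d) = d * (n / d) / (n / d) := by rw [← heq]
      _ = d := Int.mul_ediv_cancel _ (by omega : n / d ≠ 0)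
  have hle : n / d ≤ n := by nlinarith
  exact ⟨he1, hmul, hdvd, hedvd, hback, hle⟩

-- B's loop adds the pair contributions of the small divisors ≥ i
lemma pvBLoop (n i s : Int) (hn : 1 ≤ n) (hi : 1 ≤ i) :
    pvAltLoop n i s
      = s + ∑ d ∈ (Finset.Icc i n).filter (fun d => d * d ≤ n ∧ d ∣ n), pvContrib n d := by
  by_cases h : i * i ≤ n
  · have hin : i ≤ n := by nlinarith
    rw [pvAltLoop]
    simp only [h, dite_true]
    rw [pvBLoop n (i + 1) _ hn (by omega)]
    have hsplit : (Finset.Icc i n).filter (fun d => d * d ≤ n ∧ d ∣ n)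
        = if i ∣ n then insert i ((Finset.Icc (i + 1) n).filter (fun d => d * d ≤ n ∧ d ∣ n))
          else (Finset.Icc (i + 1) n).filter (fun d => d * d ≤ n ∧ d ∣ n) := by
      rw [pvIccCons i n hin, Finset.filter_insert]
      by_cases hd : i ∣ n <;> simp [hd, h]
    rw [hsplit]
    have hmod : PySem.Int.mod n i = n % i := PySem.Int.mod_eq_emod_of_pos (by omega)
    have hdiv : PySem.Int.floordiv n i = n / i := PySem.Int.floordiv_eq_ediv_of_pos (by omega)
    by_cases hd : i ∣ n
    · rw [if_pos hd, Finset.sum_insert (by simp [Finset.mem_Icc])]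
      have : PySem.Int.mod n i == 0 := by
        simp [hmod, Int.emod_eq_zero_of_dvd hd]
      simp only [this, if_true, hdiv]
      unfold pvContrib
      split_ifs <;> try ring
    · have hmz : ¬ ((PySem.Int.mod n i == 0) = true) := by
        simpa [hmod] using hd
      rw [if_neg hd]
      simp [hmz]
  · rw [pvAltLoop]
    simp only [h, dite_false]
    have : (Finset.Icc i n).filter (fun d => d * d ≤ n ∧ d ∣ n) = ∅ := by
      apply Finset.filter_false_of_mem
      intro d hdm
      simp [Finset.mem_Icc] at hdm
      intro hdd
      exact absurd hdd (by nlinarith [hdm.1])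
    simp [this]
termination_by (n + 1 - i).toNat
decreasing_by omega

-- the core pairing identity: sum of proper divisors = sum of pair contributions of small divisors
lemma pvPairing (n : Int) (hn : 1 ≤ n) :
    (∑ d ∈ Finset.Ico 1 n, (if d ∣ n then d else 0))
      = ∑ d ∈ (Finset.Icc 1 n).filter (fun d => d * d ≤ n ∧ d ∣ n), pvContrib n d := by
  -- abbreviations
  set L := (Finset.Icc 1 n).filter (fun d => d * d ≤ n ∧ d ∣ n) with hL
  have hsf : (∑ d ∈ Finset.Ico 1 n, (if d ∣ n then d else 0))
      = ∑ d ∈ (Finset.Ico 1 n).filter (fun d => d ∣ n), d := (Finset.sum_filter _ _).symm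
  rw [hsf]
  set D := (Finset.Ico 1 n).filter (fun d => d ∣ n) with hD
  -- split A's proper divisors into small and large
  have hsplit : (∑ d ∈ D.filter (fun d => d * d ≤ n), d)
      + (∑ d ∈ D.filter (fun d => ¬ d * d ≤ n), d) = ∑ d ∈ D, d :=
    Finset.sum_filter_add_sum_filter_not D _ _
  -- B's sum splits into the two ite parts
  have hBsplit : (∑ d ∈ L, pvContrib n d)
      = (∑ d ∈ L, (if d ≠ n then d else 0))
        + (∑ d ∈ L, (if n / d ≠ d ∧ n / d ≠ n then n / d else 0)) := by
    unfold pvContrib; rw [Finset.sum_add_distrib]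
  -- first part: the small proper divisors
  have h1 : (∑ d ∈ L, (if d ≠ n then d else 0)) = ∑ d ∈ D.filter (fun d => d * d ≤ n), d := by
    rw [← Finset.sum_filter]
    apply Finset.sum_congr _ (fun _ _ => rfl)
    ext d
    simp only [hL, hD, Finset.mem_filter, Finset.mem_Icc, Finset.mem_Ico]
    constructor
    · rintro ⟨⟨⟨h1, h2⟩, h3, h4⟩, h5⟩; exact ⟨⟨⟨h1, by omega⟩, h4⟩, h3⟩
    · rintro ⟨⟨⟨h1, h2⟩, h4⟩, h3⟩; exact ⟨⟨⟨h1, by omega⟩, h3, h4⟩, by omega⟩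
  -- second part: the large proper divisors, via d ↦ n / d
  have h2 : (∑ d ∈ L, (if n / d ≠ d ∧ n / d ≠ n then n / d else 0))
      = ∑ d ∈ D.filter (fun d => ¬ d * d ≤ n), d := by
    rw [← Finset.sum_filter]
    apply Finset.sum_nbij' (i := fun d => n / d) (j := fun e => n / e)
    · intro d hd
      simp only [hL, Finset.mem_filter, Finset.mem_Icc] at hd
      obtain ⟨⟨⟨hd1, hdn⟩, hdd, hdvd⟩, hne, hnen⟩ := hd
      obtain ⟨he1, hmul, _, hedvd, _, hele⟩ := pvDivFacts n d hn hd1 hdvd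
      simp only [hD, Finset.mem_filter, Finset.mem_Ico]
      refine ⟨⟨⟨he1, ?_⟩, hedvd⟩, ?_⟩
      · omega
      · -- (n/d)² > n since d < n/d
        have hdlt : d < n / d := by
          rcases lt_or_ge d (n / d) with h | h
          · exact h
          · exfalso; rcases eq_or_lt_of_le h with h | h
            · exact hne h
            · nlinarith
        nlinarith
    · intro e he
      simp only [hD, Finset.mem_filter, Finset.mem_Ico] at he
      obtain ⟨⟨⟨he1, hen⟩, hedvd⟩, hbig⟩ := he
      obtain ⟨hd1, hmul, _, hddvd, hback, _⟩ := pvDivFacts n e hn he1 hedvd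
      simp only [hL, Finset.mem_filter, Finset.mem_Icc]
      have hdlt : n / e < e := by
        rcases lt_or_ge (n / e) e with h | h
        · exact h
        · exfalso; nlinarith
      refine ⟨⟨⟨hd1, by nlinarith⟩, by nlinarith, hddvd⟩, by omega, by omega⟩
    · intro d hd
      simp only [hL, Finset.mem_filter, Finset.mem_Icc] at hd
      exact (pvDivFacts n d hn hd.1.1.1 hd.1.2.2).2.2.2.2.1
    · intro e he
      simp only [hD, Finset.mem_filter, Finset.mem_Ico] at he
      exact (pvDivFacts n e hn he.1.1.1 he.1.2).2.2.2.2.1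
    · intro d hd; rfl
  rw [hBsplit, h1, h2, hsplit]

-- ===== VERDICT (by name: the statement is the Claim_ definition above) =====
theorem perfect_abundant_or_deficient_spec : Claim_equal_perfect_abundant_or_deficient := by
  intro n _
  unfold Spec_perfect_abundant_or_deficient perfect_abundant_or_deficient perfect_abundant_or_deficient_alt
  by_cases hn : 1 ≤ n
  · rw [pvAFold n n hn, pvBLoop n 1 0 hn (le_refl 1), pvPairing n hn]
    simp
  · rw [PySem.List.pyRange_one_eq_nil (by omega : n ≤ 1), pvAltLoop]
    simp [hn]
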